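-- pv_equiv track=rewrite | github.com/JacksonRudnick/fact-checker | dataset.py | _parse_wiki_lines
-- ===== SOURCE A (Python) =====
-- def _parse_wiki_lines(lines_value: str) -> list[str]:
-- 	if not lines_value:
-- 		return []
--
-- 	parsed = {}
-- 	max_index = -1
--
-- 	for line in str(lines_value).split("\n"):
-- 		if not line:
-- 			continue
--
-- 		parts = line.split("\t", 1)
-- 		if len(parts) != 2:
-- 			continue
--
-- 		index_text, sentence = parts
-- 		try:
-- 			index = int(index_text)
-- 		except ValueError:
-- 			continue
--
-- 		parsed[index] = sentence
-- 		if index > max_index: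
-- 			max_index = index
--
-- 	if max_index < 0:
-- 		return []
--
-- 	return [parsed.get(i, "") for i in range(max_index + 1)]
-- ===== SOURCE B (Python) =====
-- def _parse_wiki_lines(lines_value: str) -> list[str]:
-- 	if not lines_value:
-- 		return []
--
-- 	result = []
-- 	for line in lines_value.split("\n"):
-- 		if not line:
-- 			continue
--
-- 		parts = line.split("\t", 1)
-- 		if len(parts) != 2:
-- 			continue
--
-- 		index_text, sentence = parts
-- 		try:
-- 			index = int(index_text)
-- 		except ValueError:
-- 			continue
--
-- 		if index < 0:
-- 			continue
-- 		if index >= len(result):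
-- 			result.extend([""] * (index + 1 - len(result)))
-- 		result[index] = sentence
--
-- 	return result
-- ===== Notes on version B (the rewrite author's own statement) =====
-- stated objective: alternative
-- what changed: B builds the dense output list directly in one pass (extend with '' up to each valid non-negative index, then assign), instead of A's dict of parsed entries plus max-index tracking and a final range comprehension.
import Mathlib
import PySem

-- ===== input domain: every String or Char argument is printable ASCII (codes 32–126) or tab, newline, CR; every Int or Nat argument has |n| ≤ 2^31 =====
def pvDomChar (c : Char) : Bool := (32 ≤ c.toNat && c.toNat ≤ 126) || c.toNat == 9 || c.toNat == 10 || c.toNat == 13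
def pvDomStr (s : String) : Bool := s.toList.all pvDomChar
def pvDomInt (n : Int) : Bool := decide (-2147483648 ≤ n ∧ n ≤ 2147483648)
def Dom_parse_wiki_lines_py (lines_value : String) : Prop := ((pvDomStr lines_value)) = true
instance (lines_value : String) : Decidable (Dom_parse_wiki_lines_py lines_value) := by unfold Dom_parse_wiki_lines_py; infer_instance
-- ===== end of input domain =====

-- B builds the dense output list directly in one pass instead of A's dict + max index + range comprehension; same values everywhere.

-- ===== PORT A =====
-- loop body of A: skip empty lines, lines without a tab, non-int indices; store in dict, track max
def pwlA_step (st : PySem.Dict Int String × Int) (line : String) : PySem.Dict Int String × Int :=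
  if line = "" then st
  else
    match PySem.Str.splitMax? line "\t" 1 with
    | some [index_text, sentence] =>
      match PySem.Int.ofStr? index_text with
      | none => st
      | some index => (st.1.insert index sentence, if index > st.2 then index else st.2)
    | _ => st

def parse_wiki_lines_py (lines_value : String) : List String :=
  if lines_value = "" then []
  else
    let st := ((PySem.Str.split? lines_value "\n").getD []).foldl pwlA_step (PySem.Dict.empty, -1)
    if st.2 < 0 then []
    else (PySem.List.pyRange 0 (st.2 + 1) 1).map (fun i => st.1.getD i "")

-- ===== PORT B =====
-- loop body of B: same skips; for a valid non-negative index extend with "" and assign in place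
def pwlB_step (res : List String) (line : String) : List String :=
  if line = "" then res
  else
    match PySem.Str.splitMax? line "\t" 1 with
    | some [index_text, sentence] =>
      match PySem.Int.ofStr? index_text with
      | none => res
      | some index =>
        if index < 0 then res
        else
          let res2 := if index ≥ (res.length : Int) then res ++ List.replicate (index + 1 - (res.length : Int)).toNat "" else res
          res2.set index.toNat sentence
    | _ => res

def parse_wiki_lines_py_alt (lines_value : String) : List String :=
  if lines_value = "" then []
  else ((PySem.Str.split? lines_value "\n").getD []).foldl pwlB_step []

-- ===== PRECONDITION & SPEC =====
def Spec_parse_wiki_lines_py (lines_value : String) (out : List String) : Prop := out = parse_wiki_lines_py_alt lines_value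
instance (lines_value : String) (out : List String) : Decidable (Spec_parse_wiki_lines_py lines_value out) := by unfold Spec_parse_wiki_lines_py; infer_instance

-- ===== CLAIM (what is proved, stated in full; the proofs are below) =====
def Claim_equal_parse_wiki_lines_py : Prop := ∀ (lines_value : String), Dom_parse_wiki_lines_py lines_value → Spec_parse_wiki_lines_py lines_value (parse_wiki_lines_py lines_value)

-- ===== LEMMAS AND PROOFS =====

-- the loop invariant relating A's (dict, max) state to B's dense list
def pwlInv (st : PySem.Dict Int String × Int) (res : List String) : Prop :=
  -1 ≤ st.2 ∧ (res.length : Int) = st.2 + 1 ∧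
  (∀ i : Nat, i < res.length → res.getD i "" = st.1.getD (i : Int) "") ∧
  (∀ k : Int, st.2 < k → st.1.getD k "" = "")

theorem pwlInv_step (st : PySem.Dict Int String × Int) (res : List String) (line : String)
    (h : pwlInv st res) : pwlInv (pwlA_step st line) (pwlB_step res line) := by
  obtain ⟨hm, hlen, hval, hhigh⟩ := h
  unfold pwlA_step pwlB_step
  split
  · exact ⟨hm, hlen, hval, hhigh⟩
  split
  case _ index_text sentence heq =>
    cases hofs : PySem.Int.ofStr? index_text with
    | none => exact ⟨hm, hlen, hval, hhigh⟩
    | some index =>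
      simp only
      by_cases hneg : index < 0
      · -- A inserts a negative key; B skips. max unchanged.
        have hmx : ¬ index > st.2 := by omega
        simp only [if_pos hneg, if_neg hmx]
        refine ⟨hm, hlen, ?_, ?_⟩
        · intro i hi
          rw [hval i hi, PySem.Dict.getD_insert]
          rw [if_neg (by omega)]
        · intro k hk
          rw [PySem.Dict.getD_insert, if_neg (by omega)]
          exact hhigh k hk
      · simp only [if_neg (by omega : ¬ index < 0)]
        by_cases hbig : index ≥ (res.length : Int)
        · -- extend then set; new max is index
          have hgt : index > st.2 := by omega
          simp only [if_pos hbig, if_pos hgt]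
          have hlen2 : ((res ++ List.replicate (index + 1 - (res.length : Int)).toNat "").length : Int)
              = index + 1 := by
            simp [List.length_append, List.length_replicate]
            omega
          refine ⟨by omega, ?_, ?_, ?_⟩
          · simp only [List.length_set]
            exact hlen2
          · intro i hi
            simp only [List.length_set] at hi
            have hi' : (i : Int) < index + 1 := by
              have := hlen2
              omega
            by_cases hie : (i : Int) = index
            · have : i = index.toNat := by omega
              subst this
              rw [List.getD_eq_getElem?_getD, List.getElem?_set_self (by omega)]
              simp [hie]
            · rw [List.getD_eq_getElem?_getD, List.getElem?_set_ne (by omega)]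
              rw [PySem.Dict.getD_insert, if_neg hie]
              by_cases hilt : i < res.length
              · rw [List.getElem?_append_left hilt, ← List.getD_eq_getElem?_getD]
                exact hval i hilt
              · rw [List.getElem?_append_right (by omega)]
                have hrep : i - res.length < (index + 1 - (res.length : Int)).toNat := by omega
                rw [List.getElem?_replicate_of_lt hrep]
                simp
                exact hhigh i (by omega)
          · intro k hk
            rw [PySem.Dict.getD_insert, if_neg (by omega)]
            exact hhigh k (by omega)
        · -- in-range assignment; max unchanged
          have hmx : ¬ index > st.2 := by omega
          simp only [if_neg (by omega : ¬ index ≥ (res.length : Int)), if_neg hmx]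
          refine ⟨hm, by simpa using hlen, ?_, ?_⟩
          · intro i hi
            simp only [List.length_set] at hi
            by_cases hie : (i : Int) = index
            · have : i = index.toNat := by omega
              subst this
              rw [List.getD_eq_getElem?_getD, List.getElem?_set_self (by omega)]
              simp [hie]
            · rw [List.getD_eq_getElem?_getD, List.getElem?_set_ne (by omega), ← List.getD_eq_getElem?_getD]
              rw [hval i hi, PySem.Dict.getD_insert, if_neg hie]
          · intro k hk
            rw [PySem.Dict.getD_insert, if_neg (by omega)]
            exact hhigh k hk
  case _ => exact ⟨hm, hlen, hval, hhigh⟩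

theorem pwlInv_foldl (lines : List String) (st : PySem.Dict Int String × Int) (res : List String)
    (h : pwlInv st res) : pwlInv (lines.foldl pwlA_step st) (lines.foldl pwlB_step res) := by
  induction lines generalizing st res with
  | nil => exact h
  | cons l ls ih => exact ih _ _ (pwlInv_step st res l h)

-- ===== VERDICT (by name: the statement is the Claim_ definition above) =====
theorem parse_wiki_lines_py_spec : Claim_equal_parse_wiki_lines_py := by
  intro lines_value _
  unfold Spec_parse_wiki_lines_py parse_wiki_lines_py parse_wiki_lines_py_alt
  split
  · rfl
  · have hinv : pwlInv (((PySem.Str.split? lines_value "\n").getD []).foldl pwlA_step (PySem.Dict.empty, -1))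
        (((PySem.Str.split? lines_value "\n").getD []).foldl pwlB_step []) := by
      apply pwlInv_foldl
      refine ⟨le_refl _, by simp, by simp, by simp [PySem.Dict.getD_empty]⟩
    set stA := ((PySem.Str.split? lines_value "\n").getD []).foldl pwlA_step (PySem.Dict.empty, -1) with hstA
    set resB := ((PySem.Str.split? lines_value "\n").getD []).foldl pwlB_step [] with hresB
    obtain ⟨hm, hlen, hval, _⟩ := hinv
    show (if stA.2 < 0 then [] else (PySem.List.pyRange 0 (stA.2 + 1) 1).map (fun i => stA.1.getD i "")) = resB
    by_cases hneg : stA.2 < 0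
    · rw [if_pos hneg]
      have : resB.length = 0 := by omega
      exact (List.length_eq_zero_iff.mp this).symm
    · rw [if_neg hneg]
      apply List.ext_getElem
      · rw [List.length_map, PySem.List.length_pyRange_one]
        omega
      · intro k h1 h2
        rw [List.getElem_map]
        rw [PySem.List.getElem_pyRange_one]
        have hk : k < resB.length := h2
        have := hval k hk
        rw [List.getD_eq_getElem?_getD, List.getElem?_eq_getElem hk] at this
        simp only [Option.getD_some] at this
        rw [zero_add, ← this]
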